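-- pv_equiv track=rewrite | github.com/lkjalop/SentinelGRC | src/tests/comprehensive_framework_testing.py | _recommend_certification_sequence
-- ===== SOURCE A (Python) =====
-- from typing import Dict, Any, List, Optional
--
-- def _recommend_certification_sequence(framework_names: List[str]) -> List[str]:
--     """Recommend optimal certification sequence"""
--
--     # Simple prioritization logic
--     priority_order = [
--         'privacy_act',      # Legal requirement first
--         'essential_eight',  # Technical foundation
--         'iso_27001',        # Management system
--         'soc2',            # Market requirement
--         'nist_csf',        # Risk framework
--         'nist_800_53'      # Advanced controls
--     ]
--
--     sequence = []
--     for framework in priority_order: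
--         if framework in framework_names:
--             sequence.append(framework)
--
--     # Add any remaining frameworks
--     for framework in framework_names:
--         if framework not in sequence:
--             sequence.append(framework)
--
--     return sequence
-- ===== SOURCE B (Python) =====
-- def _recommend_certification_sequence(framework_names):
--     """Recommend optimal certification sequence (bucket placement by priority rank)."""
--     priority_order = [
--         'privacy_act',
--         'essential_eight',
--         'iso_27001',
--         'soc2',
--         'nist_csf',
--         'nist_800_53'
--     ]
--     n = len(priority_order)
--     rank = {name: i for i, name in enumerate(priority_order)}
--     buckets = [[] for _ in range(n + 1)]
--     for f in dict.fromkeys(framework_names):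
--         buckets[rank.get(f, n)].append(f)
--     out = []
--     for b in buckets:
--         out.extend(b)
--     return out
-- ===== Notes on version B (the rewrite author's own statement) =====
-- stated objective: faster
-- what changed: Replaces A's two scanning passes (priority list filtered by membership in the input, then the input filtered by repeated membership scans of the growing result list) with a rank dictionary built from the priority order, a single dict.fromkeys dedup of the input, and one bucket-placement pass dropping each name into its rank's bucket before concatenating the buckets.
import Mathlib
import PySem

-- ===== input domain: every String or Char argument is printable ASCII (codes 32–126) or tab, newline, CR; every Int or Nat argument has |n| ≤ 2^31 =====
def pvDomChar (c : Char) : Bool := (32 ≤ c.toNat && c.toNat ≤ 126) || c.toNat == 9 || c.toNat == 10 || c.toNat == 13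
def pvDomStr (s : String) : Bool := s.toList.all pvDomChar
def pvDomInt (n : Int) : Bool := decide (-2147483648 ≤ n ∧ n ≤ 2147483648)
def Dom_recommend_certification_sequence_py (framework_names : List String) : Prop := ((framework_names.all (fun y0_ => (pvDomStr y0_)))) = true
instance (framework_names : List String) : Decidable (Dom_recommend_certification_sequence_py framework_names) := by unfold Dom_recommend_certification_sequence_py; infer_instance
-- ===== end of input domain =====

-- B replaces A's two membership-scanning passes with a rank dictionary and a single
-- bucket-placement pass over the deduplicated input (alternative algorithm, same result).


-- ===== PORT A =====
def recommend_certification_sequence_py (framework_names : List String) : List String :=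
  let priority_order : List String :=
    ["privacy_act", "essential_eight", "iso_27001", "soc2", "nist_csf", "nist_800_53"]
  let sequence : List String :=
    priority_order.foldl (fun seq f => if framework_names.contains f then seq ++ [f] else seq) []
  framework_names.foldl (fun seq f => if seq.contains f then seq else seq ++ [f]) sequence

-- ===== PORT B =====
def recommend_certification_sequence_py_alt (framework_names : List String) : List String :=
  let priority_order : List String :=
    ["privacy_act", "essential_eight", "iso_27001", "soc2", "nist_csf", "nist_800_53"]
  let n : Int := priority_order.length
  let rank : PySem.Dict String Int :=
    (PySem.List.enumerate priority_order).foldl (fun d p => d.insert p.2 p.1) PySem.Dict.empty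
  let buckets : List (List String) := List.replicate (priority_order.length + 1) []
  let buckets :=
    (PySem.List.dedup framework_names).foldl
      (fun bs f =>
        PySem.List.pySetD bs (rank.getD f n) (PySem.List.pyGetD bs (rank.getD f n) [] ++ [f]))
      buckets
  buckets.foldl (fun out b => out ++ b) []

-- ===== PRECONDITION & SPEC =====
def Spec_recommend_certification_sequence_py (framework_names : List String) (out : List String) : Prop := out = recommend_certification_sequence_py_alt framework_names
instance (framework_names : List String) (out : List String) : Decidable (Spec_recommend_certification_sequence_py framework_names out) := by unfold Spec_recommend_certification_sequence_py; infer_instance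

-- ===== CLAIM (what is proved, stated in full; the proofs are below) =====
def Claim_equal_recommend_certification_sequence_py : Prop := ∀ (framework_names : List String), Dom_recommend_certification_sequence_py framework_names → Spec_recommend_certification_sequence_py framework_names (recommend_certification_sequence_py framework_names)

-- ===== LEMMAS AND PROOFS =====
def pvDed (seen : List String) : List String → List String
  | [] => []
  | x :: t => if seen.contains x then pvDed seen t else x :: pvDed (x :: seen) t

theorem pvDed_congr : ∀ (xs s t : List String), (∀ a ∈ xs, (a ∈ s ↔ a ∈ t)) →
    pvDed s xs = pvDed t xs := by
  intro xs
  induction xs with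
  | nil => intro s t h; rfl
  | cons x xs ih =>
    intro s t h
    have hx := h x (by simp)
    by_cases hxs : x ∈ s
    · simp [pvDed, hxs, hx.mp hxs]
      exact ih s t (fun a ha => h a (by simp [ha]))
    · have hxt : x ∉ t := fun c => hxs (hx.mpr c)
      simp [pvDed, hxs, hxt]
      exact ih (x :: s) (x :: t) (fun a ha => by
        simp only [List.mem_cons]
        exact or_congr Iff.rfl (h a (by simp [ha])))

theorem pvLoop2_eq : ∀ (xs s : List String),
    xs.foldl (fun seq f => if f ∈ seq then seq else seq ++ [f]) s = s ++ pvDed s xs := by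
  intro xs
  induction xs with
  | nil => intro s; simp [pvDed]
  | cons x xs ih =>
    intro s
    simp only [List.foldl_cons]
    by_cases hx : x ∈ s
    · rw [if_pos (by simpa using hx), ih]
      simp only [pvDed]
      rw [if_pos (by simpa using hx)]
    · rw [if_neg (by simpa using hx), ih]
      simp only [pvDed]
      rw [if_neg (by simpa using hx),
        pvDed_congr xs (s ++ [x]) (x :: s) (fun a _ => by simp [or_comm])]
      simp

theorem pvMem_ded : ∀ (xs s : List String) (a : String),
    a ∈ pvDed s xs ↔ a ∈ xs ∧ a ∉ s := by
  intro xs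
  induction xs with
  | nil => intro s a; simp [pvDed]
  | cons x xs ih =>
    intro s a
    by_cases hx : x ∈ s
    · simp only [pvDed]
      rw [if_pos (by simpa using hx)]
      rw [ih]
      simp only [List.mem_cons]
      constructor
      · rintro ⟨h1, h2⟩; exact ⟨Or.inr h1, h2⟩
      · rintro ⟨h1 | h1, h2⟩
        · exact absurd (h1 ▸ hx) h2
        · exact ⟨h1, h2⟩
    · simp only [pvDed]
      rw [if_neg (by simpa using hx)]
      simp only [List.mem_cons, ih]
      by_cases hax : a = x
      · subst hax; simp [hx]
      · simp [hax]

theorem pvNodup_ded : ∀ (xs s : List String), (pvDed s xs).Nodup := by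
  intro xs
  induction xs with
  | nil => intro s; simp [pvDed]
  | cons x xs ih =>
    intro s
    simp only [pvDed]
    by_cases hx : x ∈ s
    · rw [if_pos (by simpa using hx)]; exact ih s
    · rw [if_neg (by simpa using hx)]
      refine List.nodup_cons.mpr ⟨?_, ih (x :: s)⟩
      intro hmem
      exact ((pvMem_ded xs (x :: s) x).mp hmem).2 (by simp)

theorem pvDedup_eq_ded (xs : List String) : PySem.List.dedup xs = pvDed [] xs := by
  have h : PySem.List.dedup xs
      = xs.foldl (fun seq f => if f ∈ seq then seq else seq ++ [f]) [] := by
    rw [PySem.List.dedup_eq_ofList, PySem.Set.ofList_eq_foldl]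
    congr 1
    funext s x
    simp [PySem.Set.add]
  rw [h, pvLoop2_eq]
  simp

theorem pvFilter_ded (P : List String) : ∀ (xs s t : List String),
    (∀ a, a ∈ t ↔ a ∈ s ∨ a ∈ P) →
    (pvDed s xs).filter (fun a => !(P.contains a)) = pvDed t xs := by
  intro xs
  induction xs with
  | nil => intro s t h; rfl
  | cons x xs ih =>
    intro s t h
    by_cases hxs : x ∈ s
    · simp only [pvDed]
      rw [if_pos (by simpa using hxs), if_pos (by simp [h x, hxs])]
      exact ih s t h
    · by_cases hxP : x ∈ P
      · simp only [pvDed]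
        rw [if_neg (by simpa using hxs), if_pos (by simp [h x, hxP])]
        rw [List.filter_cons]
        rw [if_neg (by simp [hxP])]
        refine ih (x :: s) t (fun a => ?_)
        simp only [h a, List.mem_cons]
        constructor
        · tauto
        · rintro ((rfl | h1) | h2) <;> tauto
      · simp only [pvDed]
        rw [if_neg (by simpa using hxs), if_neg (by simp [h x]; tauto)]
        rw [List.filter_cons]
        rw [if_pos (by simp [hxP])]
        rw [ih (x :: s) (x :: t) (fun a => by simp [h a]; tauto)]

def pvRnk (f : String) : Nat :=
  if f = "privacy_act" then 0
  else if f = "essential_eight" then 1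
  else if f = "iso_27001" then 2
  else if f = "soc2" then 3
  else if f = "nist_csf" then 4
  else if f = "nist_800_53" then 5
  else 6

theorem pvRnk_lt (f : String) : pvRnk f < 7 := by
  unfold pvRnk; split_ifs <;> omega

theorem pvBucket_getD (g : String → Nat) : ∀ (ys : List String) (bs : List (List String)),
    (∀ f ∈ ys, g f < bs.length) → ∀ j : Nat,
    (ys.foldl (fun bs f => bs.set (g f) ((bs.getD (g f) []) ++ [f])) bs).getD j []
      = bs.getD j [] ++ ys.filter (fun f => g f == j) := by
  intro ys
  induction ys with
  | nil => intro bs h j; simp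
  | cons f t ih =>
    intro bs h j
    simp only [List.foldl_cons]
    rw [ih _ (fun x hx => by rw [List.length_set]; exact h x (by simp [hx]))]
    rw [List.filter_cons]
    by_cases hj : g f = j
    · subst hj
      simp only [beq_self_eq_true, if_pos]
      rw [List.getD, List.getElem?_set_self' ]
      · simp [List.getD, h f (by simp)]
    · rw [List.getD, List.getElem?_set_ne (by omega)]
      simp [List.getD, hj]

theorem pvBucket_len (g : String → Nat) : ∀ (ys : List String) (bs : List (List String)),
    (ys.foldl (fun bs f => bs.set (g f) ((bs.getD (g f) []) ++ [f])) bs).length = bs.length := by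
  intro ys
  induction ys with
  | nil => intro bs; rfl
  | cons f t ih => intro bs; simp only [List.foldl_cons]; rw [ih]; simp

theorem pvFlatten7 (bs : List (List String)) (h : bs.length = 7) :
    bs.foldl (fun out b => out ++ b) [] =
      bs.getD 0 [] ++ (bs.getD 1 [] ++ (bs.getD 2 [] ++ (bs.getD 3 [] ++
        (bs.getD 4 [] ++ (bs.getD 5 [] ++ bs.getD 6 []))))) := by
  match bs, h with
  | [b0, b1, b2, b3, b4, b5, b6], _ => simp [List.getD]

theorem pvFilter_beq_of_nodup : ∀ (l : List String), l.Nodup → ∀ p : String,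
    l.filter (fun a => a == p) = if p ∈ l then [p] else [] := by
  intro l
  induction l with
  | nil => intro _ p; simp
  | cons x t ih =>
    intro hnd p
    rw [List.filter_cons]
    by_cases hxp : x = p
    · subst hxp
      simp only [beq_self_eq_true, if_pos]
      have : x ∉ t := (List.nodup_cons.mp hnd).1
      rw [ih (List.nodup_cons.mp hnd).2 x, if_neg this]
      simp
    · rw [if_neg (by simp [hxp])]
      rw [ih (List.nodup_cons.mp hnd).2 p]
      simp [List.mem_cons, Ne.symm hxp]

theorem pvGetD_rank (f : String) :
    ((PySem.List.enumerate
        ["privacy_act", "essential_eight", "iso_27001", "soc2", "nist_csf", "nist_800_53"]).foldl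
      (fun d p => d.insert p.2 p.1) PySem.Dict.empty).getD f 6 = (pvRnk f : Int) := by
  simp only [PySem.List.enumerate_cons, PySem.List.enumerate_nil, List.foldl_cons, List.foldl_nil,
    PySem.Dict.getD_insert, pvRnk]
  norm_num
  split_ifs <;> simp_all

theorem pvRnk_beq0 (a : String) : (pvRnk a == 0) = (a == "privacy_act") := by
  unfold pvRnk; split_ifs <;> simp_all
theorem pvRnk_beq1 (a : String) : (pvRnk a == 1) = (a == "essential_eight") := by
  unfold pvRnk; split_ifs <;> simp_all
theorem pvRnk_beq2 (a : String) : (pvRnk a == 2) = (a == "iso_27001") := by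
  unfold pvRnk; split_ifs <;> simp_all
theorem pvRnk_beq3 (a : String) : (pvRnk a == 3) = (a == "soc2") := by
  unfold pvRnk; split_ifs <;> simp_all
theorem pvRnk_beq4 (a : String) : (pvRnk a == 4) = (a == "nist_csf") := by
  unfold pvRnk; split_ifs <;> simp_all
theorem pvRnk_beq5 (a : String) : (pvRnk a == 5) = (a == "nist_800_53") := by
  unfold pvRnk; split_ifs <;> simp_all
theorem pvRnk_beq6 (a : String) : (pvRnk a == 6)
    = !(["privacy_act", "essential_eight", "iso_27001", "soc2", "nist_csf", "nist_800_53"].contains a) := by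
  unfold pvRnk; split_ifs <;> simp_all

theorem pvMain (xs : List String) :
    recommend_certification_sequence_py xs = recommend_certification_sequence_py_alt xs := by
  unfold recommend_certification_sequence_py recommend_certification_sequence_py_alt
  simp only [List.length_cons, List.length_nil, List.contains_eq_mem, decide_eq_true_eq]
  rw [pvLoop2_eq, pvDedup_eq_ded]
  rw [PySem.List.foldl_append_ite_eq_filter]
  simp only [show ((0+1+1+1+1+1+1 : Nat) : Int) = (6:Int) from by norm_num,
    show (0+1+1+1+1+1+1+1 : Nat) = 7 from by norm_num]
  simp only [pvGetD_rank, PySem.List.pySetD_natCast, PySem.List.pyGetD_natCast]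
  have hb := pvBucket_getD pvRnk (pvDed [] xs) (List.replicate 7 ([] : List String))
    (fun f _ => by simpa using pvRnk_lt f)
  have hlen : (List.foldl (fun bs f => bs.set (pvRnk f) (bs.getD (pvRnk f) [] ++ [f]))
      (List.replicate 7 ([] : List String)) (pvDed [] xs)).length = 7 := by
    rw [pvBucket_len]; simp
  have hrep : ∀ j : Nat, (List.replicate 7 ([] : List String)).getD j [] = [] := by
    intro j
    simp only [List.getD, List.getElem?_replicate]
    split <;> rfl
  rw [pvFlatten7 _ hlen]
  simp only [hb, hrep, List.nil_append]
  simp only [pvRnk_beq0, pvRnk_beq1, pvRnk_beq2, pvRnk_beq3, pvRnk_beq4, pvRnk_beq5,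
    pvRnk_beq6]
  have hnd := pvNodup_ded xs []
  rw [pvFilter_beq_of_nodup _ hnd "privacy_act", pvFilter_beq_of_nodup _ hnd "essential_eight",
    pvFilter_beq_of_nodup _ hnd "iso_27001", pvFilter_beq_of_nodup _ hnd "soc2",
    pvFilter_beq_of_nodup _ hnd "nist_csf", pvFilter_beq_of_nodup _ hnd "nist_800_53"]
  rw [pvFilter_ded _ xs []
    ["privacy_act", "essential_eight", "iso_27001", "soc2", "nist_csf", "nist_800_53"]
    (fun a => by simp)]
  rw [pvDed_congr xs _
    ["privacy_act", "essential_eight", "iso_27001", "soc2", "nist_csf", "nist_800_53"]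
    (fun a ha => by simp [List.mem_filter, ha])]
  simp only [pvMem_ded, List.not_mem_nil, not_false_eq_true, and_true]
  simp [List.filter_cons, List.filter_nil]
  split_ifs <;> simp

-- ===== VERDICT (by name: the statement is the Claim_ definition above) =====
theorem recommend_certification_sequence_py_spec : Claim_equal_recommend_certification_sequence_py := by
  unfold Claim_equal_recommend_certification_sequence_py Spec_recommend_certification_sequence_py
  intro framework_names _
  exact pvMain framework_names
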